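-- pv_equiv track=rewrite | github.com/JSONMartin/codingChallenges | CodeFights/arcade/python/mex.py | mexFunction
-- ===== SOURCE A (Python) =====
-- def mexFunction(s, upperBound):
--     found = -1
--     for i in range(upperBound):
--         if i not in s:
--             found = i
--             break
--     else:
--         return upperBound
--
--     return found
-- ===== SOURCE B (Python) =====
-- def mexFunction(s, upperBound):
--     present = sorted(set(x for x in s if 0 <= x < upperBound))
--     mex = 0
--     for v in present:
--         if v != mex:
--             break
--         mex += 1
--     return mex if mex < upperBound else upperBound
-- ===== Notes on version B (the rewrite author's own statement) =====
-- stated objective: alternative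
-- what changed: Instead of scanning candidates 0..upperBound-1 with a membership test each, B sorts the distinct in-range elements of s and walks that sorted list for the first gap.
import Mathlib
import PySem

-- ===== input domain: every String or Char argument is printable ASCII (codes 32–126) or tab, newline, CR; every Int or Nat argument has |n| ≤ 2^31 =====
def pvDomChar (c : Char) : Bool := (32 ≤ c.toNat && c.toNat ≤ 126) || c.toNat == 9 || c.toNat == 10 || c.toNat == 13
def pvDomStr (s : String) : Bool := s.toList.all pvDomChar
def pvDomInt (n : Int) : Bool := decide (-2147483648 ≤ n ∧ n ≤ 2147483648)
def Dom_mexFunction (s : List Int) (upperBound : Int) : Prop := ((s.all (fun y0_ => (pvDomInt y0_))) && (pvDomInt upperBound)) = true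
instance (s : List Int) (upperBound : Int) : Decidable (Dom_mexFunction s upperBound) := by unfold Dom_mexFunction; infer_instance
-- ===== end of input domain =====

-- ===== PORT A =====
-- A: for i in range(upperBound): if i not in s: break (return i); for-else returns upperBound.
def mexLoopA (s : List Int) (upperBound i : Int) : Int :=
  if _h : i < upperBound then
    if !(s.contains i) then i else mexLoopA s upperBound (i + 1)
  else upperBound
termination_by (upperBound - i).toNat
decreasing_by omega

def mexFunction (s : List Int) (upperBound : Int) : Int :=
  mexLoopA s upperBound 0

-- ===== PORT B =====
-- B: present = sorted(set(x for x in s if 0 <= x < upperBound)); walk present for the first gap.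
def mexScanB : List Int → Int → Int
  | [], mex => mex
  | v :: t, mex => if v != mex then mex else mexScanB t (mex + 1)

def mexFunction_alt (s : List Int) (upperBound : Int) : Int :=
  let present : List Int :=
    PySem.List.sorted (PySem.Set.ofList (s.filter (fun x => decide (0 ≤ x ∧ x < upperBound))))
      (fun x => x) false
  let mex := mexScanB present 0
  if mex < upperBound then mex else upperBound

-- ===== PRECONDITION & SPEC =====
def Spec_mexFunction (s : List Int) (upperBound : Int) (out : Int) : Prop := out = mexFunction_alt s upperBound
instance (s : List Int) (upperBound : Int) (out : Int) : Decidable (Spec_mexFunction s upperBound out) := by unfold Spec_mexFunction; infer_instance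

-- ===== CLAIM (what is proved, stated in full; the proofs are below) =====
def Claim_equal_mexFunction : Prop := ∀ (s : List Int) (upperBound : Int), Dom_mexFunction s upperBound → Spec_mexFunction s upperBound (mexFunction s upperBound)

-- ===== LEMMAS AND PROOFS =====

theorem mexLoopA_of_ge (s : List Int) (ub i : Int) (h : ub ≤ i) : mexLoopA s ub i = ub := by
  rw [mexLoopA]; simp [not_lt.mpr h]

-- the joint loop invariant: if L lists, strictly increasingly, exactly the elements of s in [m, ub),
-- then B's gap scan (capped at ub) computes A's remaining loop from i = m
theorem scan_eq_loop (s : List Int) (ub : Int) (L : List Int) :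
    ∀ m : Int, L.Pairwise (· < ·) → (∀ x, x ∈ L ↔ x ∈ s ∧ m ≤ x ∧ x < ub) →
      (if mexScanB L m < ub then mexScanB L m else ub) = mexLoopA s ub m := by
  induction L with
  | nil =>
      intro m _ hmem
      simp only [mexScanB]
      split
      · next hlt =>
          rw [mexLoopA]
          have hms : m ∉ s :=
            fun hm => (List.not_mem_nil (a := m)).elim ((hmem m).mpr ⟨hm, le_refl m, hlt⟩)
          simp [hlt, hms]
      · next hge => rw [mexLoopA_of_ge s ub m (by omega)]
  | cons v t ih =>
      intro m hpw hmem
      have hv := (hmem v).mp (by simp)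
      have hvub : v < ub := hv.2.2
      have hmv : m ≤ v := hv.2.1
      have htgt : ∀ y ∈ t, v < y := (List.pairwise_cons.mp hpw).1
      by_cases hne : v = m
      · -- v == m: A sees m ∈ s and advances; B consumes v
        subst hne
        have hvs : v ∈ s := hv.1
        rw [mexLoopA]
        have hvlt : v < ub := hvub
        simp only [mexScanB, bne_self_eq_false, Bool.false_eq_true, if_false]
        have hcv : (!s.contains v) = false := by simp [hvs]
        rw [dif_pos hvlt, hcv]
        simp only [Bool.false_eq_true, if_false]
        exact ih (v + 1) (List.pairwise_cons.mp hpw).2 (fun x => by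
          constructor
          · intro hx
            have hx' := (hmem x).mp (List.mem_cons_of_mem _ hx)
            exact ⟨hx'.1, by have := htgt x hx; omega, hx'.2.2⟩
          · intro ⟨hxs, hxm, hxub⟩
            have : x ∈ v :: t := (hmem x).mpr ⟨hxs, by omega, hxub⟩
            rcases List.mem_cons.mp this with h | h
            · omega
            · exact h)
      · -- v ≠ m: first gap is m already; A's test at i = m fails (m not in s)
        have hmlt : m < ub := by omega
        have hms : m ∉ s := fun hm => by
          have : m ∈ v :: t := (hmem m).mpr ⟨hm, le_refl m, hmlt⟩
          rcases List.mem_cons.mp this with h | h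
          · exact hne h.symm
          · have := htgt m h; omega
        have hvne : (v != m) = true := bne_iff_ne.mpr hne
        simp only [mexScanB, hvne, if_true]
        rw [if_pos hmlt, mexLoopA, dif_pos hmlt, if_pos (by simp [hms])]

-- ===== VERDICT (by name: the statement is the Claim_ definition above) =====
theorem mexFunction_spec : Claim_equal_mexFunction := by
  intro s ub _
  unfold Spec_mexFunction mexFunction mexFunction_alt
  refine (scan_eq_loop s ub _ 0 (PySem.List.sorted_ofList_pairwise_lt _) (fun x => ?_)).symm
  rw [(PySem.List.sorted_perm _ _ _).mem_iff]
  simp [PySem.Set.mem_ofList, List.mem_filter]
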